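-- pv_equiv track=rewrite | github.com/Yashikab/br_mkdb | src/domain/model/info.py | renfuku_keylist
-- ===== SOURCE A (Python) =====
-- def renfuku_keylist(rank: int) -> list:
--     renfuku_key_list = []
--     if rank == 2:
--         for fst in range(1, 6):
--             for snd in range(fst + 1, 7):
--                 renfuku_key_list.append(f"comb_{fst}{snd}")
--         return renfuku_key_list
--     elif rank == 3:
--         for fst in range(1, 5):
--             for snd in range(fst + 1, 6):
--                 for trd in range(snd + 1, 7):
--                     renfuku_key_list.append(f"comb_{fst}{snd}{trd}")
--         return renfuku_key_list
-- ===== SOURCE B (Python) =====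
-- def _combos(lo, k):
--     # all strictly increasing digit strings of length k drawn from lo..6
--     if k == 0:
--         return [""]
--     return [str(i) + rest for i in range(lo, 8 - k) for rest in _combos(i + 1, k - 1)]
--
--
-- def renfuku_keylist(rank: int) -> list:
--     if rank in (2, 3):
--         return ["comb_" + s for s in _combos(1, rank)]
-- ===== Notes on version B (the rewrite author's own statement) =====
-- stated objective: alternative
-- what changed: Replaces the two hard-coded branches with 2 and 3 nested loops by a single recursive combination generator parameterized on rank, formatting each increasing tuple as a digit string.
import Mathlib
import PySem

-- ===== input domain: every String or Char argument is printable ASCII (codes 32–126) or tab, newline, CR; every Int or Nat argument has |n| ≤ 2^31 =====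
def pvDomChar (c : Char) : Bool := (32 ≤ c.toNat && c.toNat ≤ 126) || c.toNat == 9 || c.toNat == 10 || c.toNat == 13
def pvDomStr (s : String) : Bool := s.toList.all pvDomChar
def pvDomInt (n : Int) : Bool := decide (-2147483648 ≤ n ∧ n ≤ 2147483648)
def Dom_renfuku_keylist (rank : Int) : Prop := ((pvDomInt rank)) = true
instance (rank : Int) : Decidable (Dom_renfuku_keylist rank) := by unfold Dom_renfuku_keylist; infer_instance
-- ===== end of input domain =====

-- ===== PORT A =====
-- Literal port of A: two branches with nested loops appending "comb_<digits>".
def renfuku_keylist (rank : Int) : Option (List String) :=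
  if rank = 2 then
    some ((PySem.List.pyRange 1 6 1).foldl (fun acc fst =>
      (PySem.List.pyRange (fst + 1) 7 1).foldl (fun acc snd =>
        acc ++ ["comb_" ++ PySem.Int.toStr fst ++ PySem.Int.toStr snd]) acc) [])
  else if rank = 3 then
    some ((PySem.List.pyRange 1 5 1).foldl (fun acc fst =>
      (PySem.List.pyRange (fst + 1) 6 1).foldl (fun acc snd =>
        (PySem.List.pyRange (snd + 1) 7 1).foldl (fun acc trd =>
          acc ++ ["comb_" ++ PySem.Int.toStr fst ++ PySem.Int.toStr snd ++ PySem.Int.toStr trd]) acc) acc) [])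
  else none

-- ===== PORT B =====
-- B: single recursive generator of increasing digit strings, parameterized on rank.
def pvCombos (lo : Int) (k : Nat) : List String :=
  match k with
  | 0 => [""]
  | Nat.succ k' =>
    (PySem.List.pyRange lo (8 - ((k' : Int) + 1)) 1).flatMap (fun i =>
      (pvCombos (i + 1) k').map (fun rest => PySem.Int.toStr i ++ rest))

def renfuku_keylist_alt (rank : Int) : Option (List String) :=
  if rank = 2 ∨ rank = 3 then
    some ((pvCombos 1 rank.toNat).map (fun s => "comb_" ++ s))
  else none

-- ===== PRECONDITION & SPEC =====
def Spec_renfuku_keylist (rank : Int) (out : Option (List String)) : Prop := out = renfuku_keylist_alt rank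
instance (rank : Int) (out : Option (List String)) : Decidable (Spec_renfuku_keylist rank out) := by unfold Spec_renfuku_keylist; infer_instance

-- ===== CLAIM (what is proved, stated in full; the proofs are below) =====
def Claim_equal_renfuku_keylist : Prop := ∀ (rank : Int), Dom_renfuku_keylist rank → Spec_renfuku_keylist rank (renfuku_keylist rank)

-- ===== LEMMAS AND PROOFS =====

-- ===== VERDICT (by name: the statement is the Claim_ definition above) =====
theorem renfuku_keylist_spec : Claim_equal_renfuku_keylist := by
  intro rank _
  unfold Spec_renfuku_keylist
  by_cases h2 : rank = 2
  · subst h2; decide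
  · by_cases h3 : rank = 3
    · subst h3; decide
    · simp [renfuku_keylist, renfuku_keylist_alt, h2, h3]
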